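-- pv_equiv track=rewrite | github.com/google-research/language | language/compgen/nqg/tasks/geoquery/funql_normalization.py | add_space_separation
-- ===== SOURCE A (Python) =====
-- def add_space_separation(funql):
--   """Split funql and join with space separator."""
--   separators = "(),"
--   buffer = ""
--   symbols = []
--   for char in funql:
--     if char in separators:
--       if buffer:
--         symbols.append(buffer)
--         buffer = ""
--       symbols.append(char)
--     else:
--       buffer += char
--   if buffer:
--     symbols.append(buffer)
--   return " ".join(symbols)
-- ===== SOURCE B (Python) =====
-- def add_space_separation(funql):
--   """Split funql and join with space separator."""
--   seps = "(),"
--   tokens = []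
--   rest = funql
--   while rest:
--     if rest[0] in seps:
--       tokens.append(rest[0])
--       rest = rest[1:]
--     else:
--       k = 1
--       while k < len(rest) and rest[k] not in seps:
--         k += 1
--       tokens.append(rest[:k])
--       rest = rest[k:]
--   return " ".join(tokens)
-- ===== Notes on version B (the rewrite author's own statement) =====
-- stated objective: alternative
-- what changed: Replaces the character-by-character buffer/flush accumulation with span-based tokenization: each step emits either one separator or a whole maximal non-separator run sliced off the front of the remaining string, with no buffer state.
import Mathlib
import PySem

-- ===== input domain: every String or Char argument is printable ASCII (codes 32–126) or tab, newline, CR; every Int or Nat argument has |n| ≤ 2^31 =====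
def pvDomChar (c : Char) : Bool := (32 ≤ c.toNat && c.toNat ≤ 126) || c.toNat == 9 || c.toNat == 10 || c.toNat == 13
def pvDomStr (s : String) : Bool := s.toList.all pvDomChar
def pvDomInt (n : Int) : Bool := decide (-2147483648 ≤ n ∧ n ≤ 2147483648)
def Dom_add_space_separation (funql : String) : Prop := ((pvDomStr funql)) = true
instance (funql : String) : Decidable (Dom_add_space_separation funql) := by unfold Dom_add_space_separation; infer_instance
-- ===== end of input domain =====

-- B replaces A's character-by-character buffer/flush loop with span-based tokenization
-- (emit a separator, or slice a whole maximal non-separator run off the front); alternative, not faster.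

-- ===== PORT A =====
-- char in "()," (single-char membership in the separator string)
def pvIsSep (c : Char) : Bool := "(),".toList.contains c

-- one iteration of A's for-loop: state = (buffer, symbols)
def pvAStep (st : List Char × List (List Char)) (c : Char) : List Char × List (List Char) :=
  if pvIsSep c then
    if st.1 ≠ [] then ([], st.2 ++ [st.1] ++ [[c]]) else ([], st.2 ++ [[c]])
  else (st.1 ++ [c], st.2)

def add_space_separation (funql : String) : String :=
  let st := funql.toList.foldl pvAStep ([], [])
  let symbols := if st.1 ≠ [] then st.2 ++ [st.1] else st.2
  String.ofList (PySem.Chars.join " ".toList symbols)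

-- ===== PORT B =====
-- span-based tokenizer: B's outer while loop; the inner while (k-scan) is takeWhile/dropWhile
def pvTokens : List Char → List (List Char)
  | [] => []
  | c :: rest =>
    if pvIsSep c then [c] :: pvTokens rest
    else (c :: rest.takeWhile (fun d => !pvIsSep d)) :: pvTokens (rest.dropWhile (fun d => !pvIsSep d))
  termination_by cs => cs.length
  decreasing_by
    · simp
    · exact Nat.lt_succ_of_le (rest.length_dropWhile_le _)

def add_space_separation_alt (funql : String) : String :=
  String.ofList (PySem.Chars.join " ".toList (pvTokens funql.toList))

-- ===== PRECONDITION & SPEC =====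
def Spec_add_space_separation (funql : String) (out : String) : Prop := out = add_space_separation_alt funql
instance (funql : String) (out : String) : Decidable (Spec_add_space_separation funql out) := by unfold Spec_add_space_separation; infer_instance

-- ===== CLAIM (what is proved, stated in full; the proofs are below) =====
def Claim_equal_add_space_separation : Prop := ∀ (funql : String), Dom_add_space_separation funql → Spec_add_space_separation funql (add_space_separation funql)

-- ===== LEMMAS AND PROOFS =====

-- A's final flush, as a named function of the loop state
def pvFinal (st : List Char × List (List Char)) : List (List Char) :=
  if st.1 ≠ [] then st.2 ++ [st.1] else st.2

-- A's loop result, expressed recursively: tokens of cs given a pending buffer buf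
def pvTok2 (buf : List Char) : List Char → List (List Char)
  | [] => if buf ≠ [] then [buf] else []
  | c :: cs =>
    if pvIsSep c then (if buf ≠ [] then [buf] ++ [[c]] else [[c]]) ++ pvTok2 [] cs
    else pvTok2 (buf ++ [c]) cs

theorem pvFoldl_eq_tok2 (cs : List Char) (buf : List Char) (syms : List (List Char)) :
    pvFinal (cs.foldl pvAStep (buf, syms)) = syms ++ pvTok2 buf cs := by
  induction cs generalizing buf syms with
  | nil => simp only [List.foldl_nil, pvFinal, pvTok2]; split <;> simp
  | cons c cs ih =>
    simp only [List.foldl_cons, pvAStep, pvTok2]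
    by_cases hs : pvIsSep c <;> by_cases hb : buf = [] <;>
      simp [hs, hb, ih]

-- pvTok2 with an empty buffer is B's tokenizer; with a pending buffer the buffer merges with the leading run
theorem pvTok2_eq_tokens (cs : List Char) :
    pvTok2 [] cs = pvTokens cs ∧
      ∀ buf, buf ≠ [] →
        pvTok2 buf cs =
          (buf ++ cs.takeWhile (fun d => !pvIsSep d)) :: pvTokens (cs.dropWhile (fun d => !pvIsSep d)) := by
  induction cs with
  | nil => exact ⟨by simp [pvTok2, pvTokens], fun buf hb => by simp [pvTok2, pvTokens, hb]⟩
  | cons c cs ih =>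
    by_cases hs : pvIsSep c
    · exact ⟨by simp [pvTok2, pvTokens, hs, ih.1],
        fun buf hb => by simp [pvTok2, pvTokens, hs, hb, ih.1]⟩
    · refine ⟨?_, fun buf hb => ?_⟩
      · simp only [pvTok2, pvTokens, hs, Bool.false_eq_true, if_false, List.nil_append]
        exact ih.2 [c] (by simp)
      · simp only [pvTok2, hs, Bool.false_eq_true, if_false]
        rw [ih.2 (buf ++ [c]) (by simp)]
        simp [hs]

-- ===== VERDICT (by name: the statement is the Claim_ definition above) =====
theorem add_space_separation_spec : Claim_equal_add_space_separation := by
  intro funql _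
  show String.ofList (PySem.Chars.join " ".toList (pvFinal (funql.toList.foldl pvAStep ([], [])))) =
    String.ofList (PySem.Chars.join " ".toList (pvTokens funql.toList))
  rw [pvFoldl_eq_tok2, List.nil_append, (pvTok2_eq_tokens funql.toList).1]
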